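-- pv_equiv track=rewrite | github.com/sheehyct/ATLAS-Trading-System | strat/signal_automation/position_monitor.py | _parse_expiration
-- ===== SOURCE A (Python) =====
-- def _parse_expiration(osi_symbol: str) -> str:
--     """Parse expiration date from OSI symbol."""
--     # OSI format: SPY241220C00450000
--     # Extract YYMMDD from positions 3-9 (after ticker)
--     try:
--         # Find where the date starts (after ticker, before C/P)
--         for i, char in enumerate(osi_symbol):
--             if char.isdigit():
--                 date_str = osi_symbol[i:i+6]
--                 year = 2000 + int(date_str[0:2])
--                 month = int(date_str[2:4])
--                 day = int(date_str[4:6])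
--                 return f"{year}-{month:02d}-{day:02d}"
--     except (ValueError, IndexError):
--         pass
--
--     return ""
-- ===== SOURCE B (Python) =====
-- import re
--
-- _OSI_DATE = re.compile(r'[^\d]*(\d{2})(\d{2})(\d{2})')
--
-- def _parse_expiration(osi_symbol: str) -> str:
--     """Parse expiration date from OSI symbol."""
--     # One anchored regex: skip leading non-digits, then require the six-digit
--     # YYMMDD run right there ([^\d]* cannot backtrack past a digit, so the run
--     # must start at the first digit).  No numeric conversion, no validation.
--     m = _OSI_DATE.match(osi_symbol)
--     if m is None:
--         return ""
--     yy, mm, dd = m.groups()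
--     return f"20{yy}-{mm}-{dd}"
-- ===== Notes on version B (the rewrite author's own statement) =====
-- stated objective: idiomatic
-- what changed: B replaces A's hand-written scan with int() round-trips and try/except control flow by a single anchored regex ([^\d]*(\d{2})(\d{2})(\d{2})) whose three captured groups are spliced into the result string with no numeric conversion.
-- intended difference: On symbols whose first digit is not followed by a full six-digit run but whose two-char slices still satisfy int() (trailing whitespace, a sign, or a five-digit run), A fabricates a date from whatever int() accepts while B returns the empty string - the intended result, since such a symbol carries no six-digit YYMMDD expiration. — e.g. on _parse_expiration("12345"): A returns "2012-34-05", B returns ""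
import Mathlib
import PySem

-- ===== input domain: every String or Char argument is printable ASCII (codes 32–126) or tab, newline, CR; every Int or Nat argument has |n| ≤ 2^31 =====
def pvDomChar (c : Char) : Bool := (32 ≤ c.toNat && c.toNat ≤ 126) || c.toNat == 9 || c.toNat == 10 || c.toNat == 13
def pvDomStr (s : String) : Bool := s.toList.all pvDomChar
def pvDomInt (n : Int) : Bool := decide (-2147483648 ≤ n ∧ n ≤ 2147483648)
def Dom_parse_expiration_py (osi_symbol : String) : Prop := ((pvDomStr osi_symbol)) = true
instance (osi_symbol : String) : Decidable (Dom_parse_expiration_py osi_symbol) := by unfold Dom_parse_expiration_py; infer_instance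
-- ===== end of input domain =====

-- B replaces A's hand-written scan with int() round-trips and try/except by a single anchored
-- regex [^\d]*(\d{2})(\d{2})(\d{2}) whose groups are spliced into the result (idiomatic); on the
-- exceptional inputs of D_ below, B returns "" where A's lenient int() fabricates a date.

-- ===== PORT A =====
-- A's for-loop over enumerate(osi_symbol): skip until the first digit; there, slice 6 chars and
-- int() the three 2-char pieces (osi_symbol[i:i+6] = the 6-char take of the current suffix, i ≥ 0
-- in range, so Python's slice is exactly take/drop). The except-branch returns "".
def pvLoopA : List Char → String
  | [] => ""                                   -- loop exhausted without a digit
  | c :: rest =>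
    if PySem.Chars.isdigit c then
      let dateStr := (c :: rest).take 6        -- date_str = osi_symbol[i:i+6]
      match PySem.Int.ofChars? (dateStr.take 2),                 -- int(date_str[0:2])
            PySem.Int.ofChars? ((dateStr.drop 2).take 2),        -- int(date_str[2:4])
            PySem.Int.ofChars? ((dateStr.drop 4).take 2) with    -- int(date_str[4:6])
      | some y, some m, some d =>
          -- f"{year}-{month:02d}-{day:02d}"  ({:02d} on an int = str(n).zfill(2))
          String.ofList (PySem.Int.toChars (2000 + y) ++ '-' ::
                     PySem.Chars.zfill (PySem.Int.toChars m) 2 ++ '-' ::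
                     PySem.Chars.zfill (PySem.Int.toChars d) 2)
      | _, _, _ => ""                          -- ValueError caught → return ""
    else pvLoopA rest

def parse_expiration_py (osi_symbol : String) : String := pvLoopA osi_symbol.toList

-- ===== PORT B =====
-- Hand port of Source B's regex match (PySem has no regex; exact on the ASCII domain): the anchored
-- pattern [^\d]*(\d{2})(\d{2})(\d{2}).  [^\d]* can only consume the leading non-digits (it cannot
-- backtrack past a digit), then each group \d{2} consumes exactly two digit characters in turn.

-- one \d{2} group: two digit characters at the head, returning (group, remainder)
def pvGroup2? (l : List Char) : Option (List Char × List Char) :=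
  match l with
  | a :: b :: r =>
    if PySem.Chars.isdigit a && PySem.Chars.isdigit b then some ([a, b], r) else none
  | _ => none

-- the three groups matched in sequence after the [^\d]* prefix
def pvReGroups? (l : List Char) : Option (List Char × List Char × List Char) :=
  match pvGroup2? (l.dropWhile (fun c => !PySem.Chars.isdigit c)) with
  | none => none
  | some (g1, r1) =>
    match pvGroup2? r1 with
    | none => none
    | some (g2, r2) =>
      match pvGroup2? r2 with
      | none => none
      | some (g3, _) => some (g1, g2, g3)

def parse_expiration_py_alt (osi_symbol : String) : String :=
  match pvReGroups? osi_symbol.toList with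
  | none => ""                                     -- if m is None: return ""
  | some (yy, mm, dd) =>
      -- f"20{yy}-{mm}-{dd}"
      String.ofList ('2' :: '0' :: yy ++ '-' :: mm ++ '-' :: dd)

-- ===== PRECONDITION & SPEC =====
-- On symbols whose first digit is not followed by a full six-digit run but whose two-char slices
-- still satisfy int() (trailing whitespace, a sign, or a five-digit run), A fabricates a date from
-- whatever int() accepts while B returns the empty string — the intended result, since such a
-- symbol carries no six-digit YYMMDD expiration.
def D_parse_expiration_py (osi_symbol : String) : Prop :=
  let w := (osi_symbol.toList.dropWhile (fun c => !PySem.Chars.isdigit c)).take 6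
  ¬(w.length = 6 ∧ w.all PySem.Chars.isdigit) ∧
  (PySem.Int.ofChars? (w.take 2)).isSome ∧
  (PySem.Int.ofChars? ((w.drop 2).take 2)).isSome ∧
  (PySem.Int.ofChars? ((w.drop 4).take 2)).isSome
instance (osi_symbol : String) : Decidable (D_parse_expiration_py osi_symbol) := by
  unfold D_parse_expiration_py; infer_instance

def Spec_parse_expiration_py (osi_symbol : String) (out : String) : Prop :=
  ¬ D_parse_expiration_py osi_symbol → out = parse_expiration_py_alt osi_symbol
instance (osi_symbol : String) (out : String) : Decidable (Spec_parse_expiration_py osi_symbol out) := by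
  unfold Spec_parse_expiration_py; infer_instance

def pvDiffWitness_parse_expiration_py : String := "12345"
def pvDiffWitnessOut_parse_expiration_py : String × String := ("2012-34-05", "")

-- ===== CLAIM (what is proved, stated in full; the proofs are below) =====
def Claim_unchanged_parse_expiration_py : Prop := ∀ (osi_symbol : String), Dom_parse_expiration_py osi_symbol → Spec_parse_expiration_py osi_symbol (parse_expiration_py osi_symbol)
def Claim_changed_parse_expiration_py : Prop := Dom_parse_expiration_py (pvDiffWitness_parse_expiration_py) ∧ D_parse_expiration_py (pvDiffWitness_parse_expiration_py) ∧ parse_expiration_py (pvDiffWitness_parse_expiration_py) = pvDiffWitnessOut_parse_expiration_py.1 ∧ parse_expiration_py_alt (pvDiffWitness_parse_expiration_py) = pvDiffWitnessOut_parse_expiration_py.2 ∧ pvDiffWitnessOut_parse_expiration_py.1 ≠ pvDiffWitnessOut_parse_expiration_py.2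
def Claim_exact_parse_expiration_py : Prop := ∀ (osi_symbol : String), Dom_parse_expiration_py osi_symbol → D_parse_expiration_py osi_symbol → parse_expiration_py osi_symbol ≠ parse_expiration_py_alt osi_symbol

-- ===== LEMMAS AND PROOFS =====

-- A's loop skips the leading non-digits: it is its own restriction to the dropWhile suffix.
theorem pvLoopA_dropWhile (l : List Char) :
    pvLoopA l = pvLoopA (l.dropWhile (fun c => !PySem.Chars.isdigit c)) := by
  induction l with
  | nil => rfl
  | cons c r ih =>
    by_cases h : PySem.Chars.isdigit c = true
    · simp [h]
    · simp only [Bool.not_eq_true] at h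
      simp [pvLoopA, h, ih]

theorem pvDigit_decomp (c : Char) (h : PySem.Chars.isdigit c = true) :
    ∃ n, n < 10 ∧ c = Char.ofNat (48 + n) := by
  have hb : 48 ≤ c.toNat ∧ c.toNat ≤ 57 := by
    simp only [PySem.Chars.isdigit, Bool.and_eq_true, decide_eq_true_eq, Char.le_def] at h
    exact ⟨h.1, h.2⟩
  refine ⟨c.toNat - 48, by omega, ?_⟩
  have he : 48 + (c.toNat - 48) = c.toNat := by omega
  rw [he, Char.ofNat_toNat]

theorem pvOfChars_digits (a : Nat) (ha : a ∈ List.range 10) (b : Nat) (hb : b ∈ List.range 10) :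
    PySem.Int.ofChars? [Char.ofNat (48 + a), Char.ofNat (48 + b)] = some (10 * (a : Int) + (b : Int)) := by
  revert a b; decide

theorem pvToChars2000 (a : Nat) (ha : a ∈ List.range 10) (b : Nat) (hb : b ∈ List.range 10) :
    PySem.Int.toChars (2000 + (10 * (a : Int) + (b : Int))) = ['2', '0', Char.ofNat (48 + a), Char.ofNat (48 + b)] := by
  revert a b; decide

theorem pvZfill2 (a : Nat) (ha : a ∈ List.range 10) (b : Nat) (hb : b ∈ List.range 10) :
    PySem.Chars.zfill (PySem.Int.toChars (10 * (a : Int) + (b : Int))) 2 = [Char.ofNat (48 + a), Char.ofNat (48 + b)] := by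
  revert a b; decide

-- On the suffix starting at the first digit, with a full 6-digit window, A's body builds exactly
-- B's spliced string '20' ++ g1 ++ '-' ++ g2 ++ '-' ++ g3.
theorem pvBody_eq_of_digits (c : Char) (r : List Char)
    (hall : ((c :: r).take 6).all PySem.Chars.isdigit = true)
    (hlen : ((c :: r).take 6).length = 6) :
    pvLoopA (c :: r) =
      String.ofList ('2' :: '0' :: ((c :: r).take 6).take 2 ++ '-' ::
        (((c :: r).take 6).drop 2).take 2 ++ '-' :: ((c :: r).take 6).drop 4) := by
  obtain ⟨c1, c2, c3, c4, c5, r', hr⟩ :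
      ∃ c1 c2 c3 c4 c5 r', r = c1 :: c2 :: c3 :: c4 :: c5 :: r' := by
    rcases r with _ | ⟨c1, _ | ⟨c2, _ | ⟨c3, _ | ⟨c4, _ | ⟨c5, r'⟩⟩⟩⟩⟩ <;> simp_all
  subst hr
  simp only [List.take, List.all_cons, Bool.and_eq_true] at hall ⊢
  obtain ⟨h0, h1, h2, h3, h4, h5, -⟩ := hall
  obtain ⟨n0, hn0, e0⟩ := pvDigit_decomp _ h0
  obtain ⟨n1, hn1, e1⟩ := pvDigit_decomp _ h1
  obtain ⟨n2, hn2, e2⟩ := pvDigit_decomp _ h2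
  obtain ⟨n3, hn3, e3⟩ := pvDigit_decomp _ h3
  obtain ⟨n4, hn4, e4⟩ := pvDigit_decomp _ h4
  obtain ⟨n5, hn5, e5⟩ := pvDigit_decomp _ h5
  have hm0 : n0 ∈ List.range 10 := by simpa using hn0
  have hm1 : n1 ∈ List.range 10 := by simpa using hn1
  have hm2 : n2 ∈ List.range 10 := by simpa using hn2
  have hm3 : n3 ∈ List.range 10 := by simpa using hn3
  have hm4 : n4 ∈ List.range 10 := by simpa using hn4
  have hm5 : n5 ∈ List.range 10 := by simpa using hn5
  subst e0 e1 e2 e3 e4 e5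
  simp only [pvLoopA, h0, if_true]
  simp [List.take, List.drop, pvOfChars_digits _ hm0 _ hm1, pvOfChars_digits _ hm2 _ hm3,
    pvOfChars_digits _ hm4 _ hm5, pvToChars2000 _ hm0 _ hm1, pvZfill2 _ hm2 _ hm3,
    pvZfill2 _ hm4 _ hm5]

-- A successful \d{2} group is exactly two digit characters at the head.
theorem pvGroup2_some (l g r : List Char) (h : pvGroup2? l = some (g, r)) :
    ∃ a b, l = a :: b :: r ∧ g = [a, b] ∧
      PySem.Chars.isdigit a = true ∧ PySem.Chars.isdigit b = true := by
  rcases l with _ | ⟨a, _ | ⟨b, l'⟩⟩ <;> simp only [pvGroup2?] at h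
  · simp at h
  · simp at h
  · split_ifs at h with hd
    · simp only [Option.some.injEq, Prod.mk.injEq] at h
      exact ⟨a, b, by simp [h.2], h.1.symm, by simp_all, by simp_all⟩

-- If B's regex matches, the window really is a full 6-digit run and the groups are its pairs.
theorem pvReGroups_some (l rest : List Char)
    (hrest : l.dropWhile (fun c => !PySem.Chars.isdigit c) = rest)
    (g : List Char × List Char × List Char) (h : pvReGroups? l = some g) :
    ((rest.take 6).length = 6 ∧ (rest.take 6).all PySem.Chars.isdigit = true) ∧
    g = ((rest.take 6).take 2, ((rest.take 6).drop 2).take 2, (rest.take 6).drop 4) := by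
  unfold pvReGroups? at h
  rw [hrest] at h
  rcases hm1 : pvGroup2? rest with _ | ⟨g1, r1⟩
  · simp [hm1] at h
  simp only [hm1] at h
  rcases hm2 : pvGroup2? r1 with _ | ⟨g2, r2⟩
  · simp [hm2] at h
  simp only [hm2] at h
  rcases hm3 : pvGroup2? r2 with _ | ⟨g3, r3⟩
  · simp [hm3] at h
  simp only [hm3, Option.some.injEq] at h
  obtain ⟨a, b, e1, eg1, da, db⟩ := pvGroup2_some _ _ _ hm1
  obtain ⟨c, d, e2, eg2, dc, dd⟩ := pvGroup2_some _ _ _ hm2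
  obtain ⟨e, f, e3, eg3, de, df⟩ := pvGroup2_some _ _ _ hm3
  subst e1 e2 e3 eg1 eg2 eg3
  subst h
  simp_all [List.take, List.drop]

-- If the window is a full 6-digit run, the regex matches with exactly those groups.
theorem pvReGroups_of_digits (l : List Char)
    (hlen : ((l.dropWhile (fun c => !PySem.Chars.isdigit c)).take 6).length = 6)
    (hall : ((l.dropWhile (fun c => !PySem.Chars.isdigit c)).take 6).all PySem.Chars.isdigit = true) :
    pvReGroups? l =
      some (((l.dropWhile (fun c => !PySem.Chars.isdigit c)).take 6).take 2,
            (((l.dropWhile (fun c => !PySem.Chars.isdigit c)).take 6).drop 2).take 2,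
            ((l.dropWhile (fun c => !PySem.Chars.isdigit c)).take 6).drop 4) := by
  unfold pvReGroups?
  rcases hrest : l.dropWhile (fun c => !PySem.Chars.isdigit c) with
    _ | ⟨a, _ | ⟨b, _ | ⟨c, _ | ⟨d, _ | ⟨e, _ | ⟨f, r'⟩⟩⟩⟩⟩⟩ <;>
    rw [hrest] at hlen hall <;> simp_all [pvGroup2?, List.take, List.drop]

theorem pvHead_digit (s : String) (c : Char) (r : List Char)
    (hrest : s.toList.dropWhile (fun c => !PySem.Chars.isdigit c) = c :: r) :
    PySem.Chars.isdigit c = true := by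
  have := List.head_dropWhile_not (fun c => !PySem.Chars.isdigit c)
    (l := s.toList) (by simp [hrest])
  simp only [hrest, List.head_cons] at this
  simpa using this

-- A's loop body at the first digit, written on the 6-char window (match form for case analysis).
theorem pvLoopA_cons_eq (c : Char) (r : List Char) (hc : PySem.Chars.isdigit c = true) :
    pvLoopA (c :: r) =
      (match PySem.Int.ofChars? (((c :: r).take 6).take 2),
             PySem.Int.ofChars? ((((c :: r).take 6).drop 2).take 2),
             PySem.Int.ofChars? ((((c :: r).take 6).drop 4).take 2) with
       | some y, some m, some d =>
           String.ofList (PySem.Int.toChars (2000 + y) ++ '-' ::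
                      PySem.Chars.zfill (PySem.Int.toChars m) 2 ++ '-' ::
                      PySem.Chars.zfill (PySem.Int.toChars d) 2)
       | _, _, _ => "") := by
  simp [pvLoopA, hc]

-- B returns "" whenever the window is not a full 6-digit run.
theorem pvAlt_empty (s : String)
    (hw : ¬(((s.toList.dropWhile (fun c => !PySem.Chars.isdigit c)).take 6).length = 6 ∧
            ((s.toList.dropWhile (fun c => !PySem.Chars.isdigit c)).take 6).all PySem.Chars.isdigit = true)) :
    parse_expiration_py_alt s = "" := by
  unfold parse_expiration_py_alt
  cases hm : pvReGroups? s.toList with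
  | none => rfl
  | some g => exact absurd (pvReGroups_some _ _ rfl _ hm).1 hw

theorem pvMain (osi_symbol : String) (hD : ¬ D_parse_expiration_py osi_symbol) :
    parse_expiration_py osi_symbol = parse_expiration_py_alt osi_symbol := by
  unfold parse_expiration_py
  unfold D_parse_expiration_py at hD
  rw [pvLoopA_dropWhile]
  cases hrest : osi_symbol.toList.dropWhile (fun c => !PySem.Chars.isdigit c) with
  | nil =>
    rw [pvAlt_empty _ (by rw [hrest]; simp)]
    simp [pvLoopA]
  | cons c r =>
    rw [hrest] at hD
    by_cases hw : ((c :: r).take 6).length = 6 ∧ ((c :: r).take 6).all PySem.Chars.isdigit = true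
    · -- full 6-digit window: both succeed with the same string
      rw [pvBody_eq_of_digits c r hw.2 hw.1]
      unfold parse_expiration_py_alt
      rw [pvReGroups_of_digits osi_symbol.toList (by rw [hrest]; exact hw.1) (by rw [hrest]; exact hw.2)]
      rw [hrest]
    · -- defective window: ¬D_ forces one int() piece to fail, so A returns "" like B
      have hpieces : ¬ ((PySem.Int.ofChars? (((c :: r).take 6).take 2)).isSome = true ∧
          (PySem.Int.ofChars? ((((c :: r).take 6).drop 2).take 2)).isSome = true ∧
          (PySem.Int.ofChars? ((((c :: r).take 6).drop 4).take 2)).isSome = true) := by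
        intro hp
        exact hD ⟨fun h => hw ⟨h.1, h.2⟩, hp.1, hp.2.1, hp.2.2⟩
      rw [pvAlt_empty _ (by rw [hrest]; exact hw)]
      have hc := pvHead_digit _ _ _ hrest
      rw [pvLoopA_cons_eq c r hc]
      rcases h1 : PySem.Int.ofChars? (((c :: r).take 6).take 2) with _ | y
      · rfl
      rcases h2 : PySem.Int.ofChars? ((((c :: r).take 6).drop 2).take 2) with _ | m
      · rfl
      rcases h3 : PySem.Int.ofChars? ((((c :: r).take 6).drop 4).take 2) with _ | d
      · rfl
      · exact absurd ⟨by rw [h1]; rfl, by rw [h2]; rfl, by rw [h3]; rfl⟩ hpieces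

-- ===== VERDICT (by name: the statement is the Claim_ definition above) =====
theorem parse_expiration_py_spec : Claim_unchanged_parse_expiration_py := by
  intro s _ hD
  exact pvMain s hD

theorem parse_expiration_py_changed : Claim_changed_parse_expiration_py := by
  unfold Claim_changed_parse_expiration_py; decide

theorem parse_expiration_py_tight : Claim_exact_parse_expiration_py := by
  intro s _ hD
  unfold parse_expiration_py
  unfold D_parse_expiration_py at hD
  rw [pvLoopA_dropWhile]
  cases hrest : s.toList.dropWhile (fun c => !PySem.Chars.isdigit c) with
  | nil =>
    rw [hrest] at hD
    exact absurd hD.2.1 (by decide)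
  | cons c r =>
    rw [hrest] at hD
    obtain ⟨hw, hp1, hp2, hp3⟩ := hD
    rw [pvAlt_empty _ (by rw [hrest]; exact fun h => hw ⟨h.1, h.2⟩)]
    have hc := pvHead_digit _ _ _ hrest
    rcases Option.isSome_iff_exists.mp hp1 with ⟨y, h1⟩
    rcases Option.isSome_iff_exists.mp hp2 with ⟨m, h2⟩
    rcases Option.isSome_iff_exists.mp hp3 with ⟨d, h3⟩
    rw [pvLoopA_cons_eq c r hc, h1, h2, h3]
    simp only []
    intro hcontr
    have h4 := String.ofList_inj.mp (hcontr.trans (by rfl))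
    simp at h4
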